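-- pv_equiv track=rewrite | github.com/Mr-Moody/SmolVLA-Testing | scripts/postprocess.py | is_forward_transition
-- ===== SOURCE A (Python) =====
-- CANONICAL_SEQUENCE = [
--     "approach_MSD_plug",
--     "approach_MSD_plug,grasp_the_plug",
--     "grasp_the_plug",
--     "move_the_plug_to_the_socket",
--     "place_the_plug_in_the_socket",
--     "nudging_the_plug_into_the_socket",
--     "align_handle",
--     "push_down_on_the_plug",
-- ]
--
-- OPTIONAL_STATES = {
--     "nudging_the_plug_into_the_socket",
--     "align_handle",
-- }
--
-- STATE_INDEX = {state: idx for idx, state in enumerate(CANONICAL_SEQUENCE)}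
--
-- def is_forward_transition(current: str | None, candidate: str) -> bool:
--     """
--     True if `candidate` is the next allowed state from `current`. Optional
--     states can be skipped, so the next state may be 1, 2, or 3 positions
--     ahead in CANONICAL_SEQUENCE if the intervening states are all optional.
--     """
--     if candidate not in STATE_INDEX:
--         return False
--     if current is None:
--         # Only valid first state is approach_MSD_plug or the merge label.
--         return candidate in ("approach_MSD_plug", "approach_MSD_plug,grasp_the_plug")
--     cur_idx = STATE_INDEX[current]
--     cand_idx = STATE_INDEX[candidate]
--     if cand_idx <= cur_idx:
--         return False
--     # Allow skipping over consecutive optional states.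
--     for between_idx in range(cur_idx + 1, cand_idx):
--         if CANONICAL_SEQUENCE[between_idx] not in OPTIONAL_STATES:
--             return False
--     return True
-- ===== SOURCE B (Python) =====
-- CANONICAL_SEQUENCE = [
--     "approach_MSD_plug",
--     "approach_MSD_plug,grasp_the_plug",
--     "grasp_the_plug",
--     "move_the_plug_to_the_socket",
--     "place_the_plug_in_the_socket",
--     "nudging_the_plug_into_the_socket",
--     "align_handle",
--     "push_down_on_the_plug",
-- ]
--
-- OPTIONAL_STATES = {
--     "nudging_the_plug_into_the_socket",
--     "align_handle",
-- }
--
-- STATE_INDEX = {state: idx for idx, state in enumerate(CANONICAL_SEQUENCE)}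
--
--
-- def _reachable(tail):
--     """States reachable in one forward step given the tail after the source:
--     the first state of the tail plus every state reached by skipping a run of
--     optional states."""
--     out = set()
--     for state in tail:
--         out.add(state)
--         if state not in OPTIONAL_STATES:
--             break
--     return out
--
--
-- # Transition table precomputed once at module load: None and every canonical
-- # state mapped to the set of its legal next states.
-- ALLOWED = {None: {"approach_MSD_plug", "approach_MSD_plug,grasp_the_plug"}}
-- for _idx, _state in enumerate(CANONICAL_SEQUENCE):
--     ALLOWED[_state] = _reachable(CANONICAL_SEQUENCE[_idx + 1:])
--
--
-- def is_forward_transition(current: str | None, candidate: str) -> bool: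
--     if candidate not in STATE_INDEX:
--         return False
--     return candidate in ALLOWED[current]
-- ===== Notes on version B (the rewrite author's own statement) =====
-- stated objective: idiomatic
-- what changed: B precomputes once at module load a transition table ALLOWED mapping None and each canonical state to the set of its legal next states (applying the skip-consecutive-optional-states rule per source), so the function body becomes a candidate-validity guard plus one table lookup and set membership, replacing A's per-call index comparison and scan over the intervening states.
import Mathlib
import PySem

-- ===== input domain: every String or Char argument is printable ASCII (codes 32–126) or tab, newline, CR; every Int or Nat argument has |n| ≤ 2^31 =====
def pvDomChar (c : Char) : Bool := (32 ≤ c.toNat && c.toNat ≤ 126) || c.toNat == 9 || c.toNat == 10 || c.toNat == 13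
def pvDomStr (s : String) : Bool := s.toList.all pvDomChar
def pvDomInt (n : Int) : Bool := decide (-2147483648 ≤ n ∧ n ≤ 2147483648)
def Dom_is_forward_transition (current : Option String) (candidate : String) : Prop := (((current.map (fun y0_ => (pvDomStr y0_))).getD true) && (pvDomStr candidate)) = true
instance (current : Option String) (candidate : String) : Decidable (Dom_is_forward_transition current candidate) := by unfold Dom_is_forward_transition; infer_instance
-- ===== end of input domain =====

-- B replaces A's per-call index-and-scan check by a transition table precomputed once at
-- module load (objective: idiomatic data-structure change); return-value equivalence only.

-- module-level constants shared by both versions (same module in Python)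
def canonicalSequence : List String :=
  ["approach_MSD_plug",
   "approach_MSD_plug,grasp_the_plug",
   "grasp_the_plug",
   "move_the_plug_to_the_socket",
   "place_the_plug_in_the_socket",
   "nudging_the_plug_into_the_socket",
   "align_handle",
   "push_down_on_the_plug"]

def optionalStates : PySem.Set String :=
  PySem.Set.ofList ["nudging_the_plug_into_the_socket", "align_handle"]

def stateIndex : PySem.Dict String Int :=
  (PySem.List.enumerate canonicalSequence).foldl (fun d p => d.insert p.2 p.1) PySem.Dict.empty

-- ===== PORT A =====
def is_forward_transition (current : Option String) (candidate : String) : Bool :=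
  if !(stateIndex.contains candidate) then false
  else
    match current with
    | none =>
        candidate == "approach_MSD_plug" || candidate == "approach_MSD_plug,grasp_the_plug"
    | some cur =>
        -- STATE_INDEX[current]: KeyError for an unknown cur — excluded by Pre_; default unused there
        let curIdx := stateIndex.getD cur 0
        let candIdx := stateIndex.getD candidate 0
        if candIdx ≤ curIdx then false
        else
          (PySem.List.pyRange (curIdx + 1) candIdx 1).all
            (fun j => optionalStates.contains (PySem.List.pyGetD canonicalSequence j ""))

-- ===== PORT B =====
def reachable : List String → PySem.Set String
  | [] => PySem.Set.ofList []
  | s :: rest =>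
      if optionalStates.contains s then PySem.Set.add (reachable rest) s
      else PySem.Set.ofList [s]

def allowedTable : PySem.Dict (Option String) (PySem.Set String) :=
  (PySem.List.enumerate canonicalSequence).foldl
    (fun d p => d.insert (some p.2)
      (reachable (PySem.List.slice canonicalSequence (some (p.1 + 1)) none)))
    (PySem.Dict.empty.insert none
      (PySem.Set.ofList ["approach_MSD_plug", "approach_MSD_plug,grasp_the_plug"]))

def is_forward_transition_alt (current : Option String) (candidate : String) : Bool :=
  if !(stateIndex.contains candidate) then false
  else
    match allowedTable.get? current with
    | some nexts => nexts.contains candidate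
    | none => false   -- ALLOWED[current]: KeyError in Python — excluded by Pre_

-- ===== PRECONDITION & SPEC =====
-- Pre_ excludes exactly the inputs where candidate is a canonical state but current is a
-- non-None string outside the sequence: there both A and B raise KeyError.
def Pre_is_forward_transition (current : Option String) (candidate : String) : Prop :=
  candidate ∈ canonicalSequence → current.all (fun c => canonicalSequence.contains c) = true

instance (current : Option String) (candidate : String) : Decidable (Pre_is_forward_transition current candidate) := by
  unfold Pre_is_forward_transition; infer_instance

def pvWitness_is_forward_transition : Option String × String :=
  (some "approach_MSD_plug", "approach_MSD_plug,grasp_the_plug")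

def Spec_is_forward_transition (current : Option String) (candidate : String) (out : Bool) : Prop := out = is_forward_transition_alt current candidate
instance (current : Option String) (candidate : String) (out : Bool) : Decidable (Spec_is_forward_transition current candidate out) := by unfold Spec_is_forward_transition; infer_instance

-- ===== CLAIM (what is proved, stated in full; the proofs are below) =====
def Claim_equal_is_forward_transition : Prop := ∀ (current : Option String) (candidate : String), Dom_is_forward_transition current candidate → Pre_is_forward_transition current candidate → Spec_is_forward_transition current candidate (is_forward_transition current candidate)

-- ===== LEMMAS AND PROOFS =====
-- both programs agree whenever current is None-or-canonical and candidate is canonical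
lemma closed_agree :
    ∀ current ∈ (none : Option String) :: canonicalSequence.map some,
      ∀ cand ∈ canonicalSequence,
        is_forward_transition current cand = is_forward_transition_alt current cand := by
  decide

lemma stateIndex_contains (c : String) :
    stateIndex.contains c = canonicalSequence.contains c := by
  by_cases hc : c ∈ canonicalSequence
  · simp only [canonicalSequence, List.mem_cons, List.not_mem_nil, or_false] at hc
    rcases hc with rfl|rfl|rfl|rfl|rfl|rfl|rfl|rfl <;> decide
  · simp only [canonicalSequence, List.mem_cons, List.not_mem_nil, or_false, not_or] at hc
    obtain ⟨h1,h2,h3,h4,h5,h6,h7,h8⟩ := hc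
    have he : stateIndex = PySem.Dict.mk
      [("approach_MSD_plug",0),("approach_MSD_plug,grasp_the_plug",1),("grasp_the_plug",2),
       ("move_the_plug_to_the_socket",3),("place_the_plug_in_the_socket",4),
       ("nudging_the_plug_into_the_socket",5),("align_handle",6),("push_down_on_the_plug",7)] := by rfl
    rw [he]
    simp [canonicalSequence, PySem.Dict.contains_mk, Ne.symm h1, Ne.symm h2, Ne.symm h3,
      Ne.symm h4, Ne.symm h5, Ne.symm h6, Ne.symm h7, Ne.symm h8, h1, h2, h3, h4, h5, h6, h7, h8]

-- ===== VERDICT (by name: the statement is the Claim_ definition above) =====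
theorem is_forward_transition_spec : Claim_equal_is_forward_transition := by
  intro current candidate _ hp
  unfold Spec_is_forward_transition
  by_cases hc : candidate ∈ canonicalSequence
  · have hcur : current ∈ (none : Option String) :: canonicalSequence.map some := by
      cases current with
      | none => simp
      | some cur =>
          have := hp hc
          simp only [Option.all] at this
          simp [List.mem_cons, List.mem_map]
          exact List.contains_iff_mem.mp this
    exact (closed_agree current hcur candidate hc).symm ▸ rfl
  · have h1 : stateIndex.contains candidate = false := by
      rw [stateIndex_contains]
      simpa using hc
    simp [is_forward_transition, is_forward_transition_alt, h1]
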